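-- pv_equiv track=rewrite | github.com/Gjts/SuperOPC | scripts/cli/state.py | _parse_patch_args
-- ===== SOURCE A (Python) =====
-- def _parse_patch_args(args: list[str]) -> dict[str, str]:
--     """Parse --field value pairs for state patch."""
--     patches: dict[str, str] = {}
--     i = 0
--     while i < len(args):
--         if args[i].startswith("--"):
--             key = args[i][2:]
--             if i + 1 < len(args) and not args[i + 1].startswith("--"):
--                 patches[key] = args[i + 1]
--                 i += 2
--                 continue
--         i += 1
--     return patches
-- ===== SOURCE B (Python) =====
-- def _parse_patch_args(args: list[str]) -> dict[str, str]:
--     """Parse --field value pairs for state patch."""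
--     return {
--         a[2:]: b
--         for a, b in zip(args, args[1:])
--         if a.startswith("--") and not b.startswith("--")
--     }
-- ===== Notes on version B (the rewrite author's own statement) =====
-- stated objective: idiomatic
-- what changed: Replaces the cursor-with-variable-step while loop by a dict comprehension over consecutive pairs zip(args, args[1:]), keeping pairs whose first element is a flag and second is not; the skip in A is redundant because a consumed value never starts with '--'.
import Mathlib
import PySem

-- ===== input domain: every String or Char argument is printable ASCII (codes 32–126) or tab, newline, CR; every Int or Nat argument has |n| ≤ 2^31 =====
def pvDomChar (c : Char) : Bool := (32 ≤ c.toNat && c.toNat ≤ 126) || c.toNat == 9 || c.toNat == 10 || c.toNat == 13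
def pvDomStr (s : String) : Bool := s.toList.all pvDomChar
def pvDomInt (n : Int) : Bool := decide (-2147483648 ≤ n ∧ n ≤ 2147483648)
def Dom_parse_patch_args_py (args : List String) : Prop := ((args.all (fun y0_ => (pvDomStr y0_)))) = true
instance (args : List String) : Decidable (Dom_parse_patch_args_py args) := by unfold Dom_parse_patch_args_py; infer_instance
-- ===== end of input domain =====

-- ===== PORT A =====
-- Literal transliteration of A's while-loop cursor: recursion over the remaining
-- suffix of args mirrors 'i', the Dict accumulator mirrors 'patches'.
def parse_patch_args_py_go (l : List String) (d : PySem.Dict String String) :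
    PySem.Dict String String :=
  match l with
  | [] => d
  | [a] => if PySem.Str.startswith a "--" then d else d
      -- last element: either branch just advances i past the end and the loop stops
  | a :: b :: rest' =>
    if PySem.Str.startswith a "--" then
      if !PySem.Str.startswith b "--" then
        parse_patch_args_py_go rest' (d.insert (PySem.Str.slice a (some 2) none) b)
      else parse_patch_args_py_go (b :: rest') d
    else parse_patch_args_py_go (b :: rest') d

def parse_patch_args_py (args : List String) : List (String × String) :=
  (parse_patch_args_py_go args PySem.Dict.empty).items

-- ===== PORT B =====
-- One-sentence objective: B replaces the variable-step cursor by a single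
-- comprehension over consecutive pairs zip(args, args[1:]) (idiomatic; same cost).
def parse_patch_args_py_alt_step (d : PySem.Dict String String) (p : String × String) :
    PySem.Dict String String :=
  if PySem.Str.startswith p.1 "--" && !PySem.Str.startswith p.2 "--" then
    d.insert (PySem.Str.slice p.1 (some 2) none) p.2
  else d

def parse_patch_args_py_alt (args : List String) : List (String × String) :=
  ((args.zip (PySem.List.slice args (some 1) none)).foldl
    parse_patch_args_py_alt_step PySem.Dict.empty).items

-- ===== PRECONDITION & SPEC =====
def Spec_parse_patch_args_py (args : List String) (out : List (String × String)) : Prop := out = parse_patch_args_py_alt args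
instance (args : List String) (out : List (String × String)) : Decidable (Spec_parse_patch_args_py args out) := by unfold Spec_parse_patch_args_py; infer_instance

-- ===== CLAIM (what is proved, stated in full; the proofs are below) =====
def Claim_equal_parse_patch_args_py : Prop := ∀ (args : List String), Dom_parse_patch_args_py args → Spec_parse_patch_args_py args (parse_patch_args_py args)

-- ===== LEMMAS AND PROOFS =====

theorem parse_patch_args_py_go_eq_foldl (l : List String) (d : PySem.Dict String String) :
    parse_patch_args_py_go l d =
      (l.zip l.tail).foldl parse_patch_args_py_alt_step d := by
  induction l, d using parse_patch_args_py_go.induct with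
  | case1 d => simp [parse_patch_args_py_go]
  | case2 d a h => simp [parse_patch_args_py_go]
  | case3 d a h => simp [parse_patch_args_py_go]
  | case4 d a b rest' ha hb ih =>
    have ha' : PySem.Chars.startswith a.toList ['-', '-'] = true := by simpa using ha
    have hb' : PySem.Chars.startswith b.toList ['-', '-'] = false := by simpa using hb
    simp only [parse_patch_args_py_go, ih, List.zip, List.tail, List.zipWith, List.foldl]
    simp [parse_patch_args_py_alt_step, ha', hb']
    cases rest' with
    | nil => simp
    | cons c r =>
      simp [parse_patch_args_py_alt_step, hb']
  | case5 d a b rest' ha hb ih =>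
    have hb' : PySem.Chars.startswith b.toList ['-', '-'] = true := by simpa using hb
    simp only [parse_patch_args_py_go, ih, List.zip, List.tail, List.zipWith, List.foldl]
    simp [parse_patch_args_py_alt_step, hb']
  | case6 d a b rest' ha ih =>
    have ha' : PySem.Chars.startswith a.toList ['-', '-'] = false := by simpa using ha
    simp only [parse_patch_args_py_go, ih, List.zip, List.tail, List.zipWith, List.foldl]
    simp [parse_patch_args_py_alt_step, ha']

-- ===== VERDICT (by name: the statement is the Claim_ definition above) =====
theorem parse_patch_args_py_spec : Claim_equal_parse_patch_args_py := by
  intro args _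
  unfold Spec_parse_patch_args_py parse_patch_args_py parse_patch_args_py_alt
  rw [parse_patch_args_py_go_eq_foldl, PySem.List.slice_from_one]
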